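-- pv_equiv track=rewrite | github.com/1di210299/tramites-ai-brasil-peru | packages/scraper/src/specialized_scraper.py | _categorize_sunat_procedure
-- ===== SOURCE A (Python) =====
-- def _categorize_sunat_procedure(name: str, description: str, url: str) -> str:
--     """Categorizar procedimiento de SUNAT"""
--     text = f"{name} {description} {url}".lower()
--
--     if any(word in text for word in ['importac', 'export', 'aduaner']):
--         return 'aduanero'
--     elif any(word in text for word in ['ruc', 'tributar', 'impuest']):
--         return 'tributario'
--     elif any(word in text for word in ['deposit', 'almacen']):
--         return 'deposito'
--     elif any(word in text for word in ['transit', 'transport']):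
--         return 'transito'
--     else:
--         return 'tributario'
-- ===== SOURCE B (Python) =====
-- # Aggregate-minimum over a flat keyword->rank map (order-irrelevant), then index a rank->category table.
-- _KEYWORD_RANK = {
--     'aduaner': 0, 'almacen': 2, 'deposit': 2, 'export': 0, 'importac': 0,
--     'impuest': 1, 'ruc': 1, 'transit': 3, 'transport': 3, 'tributar': 1,
-- }
-- _RANK_CATEGORY = ('aduanero', 'tributario', 'deposito', 'transito', 'tributario')
--
--
-- def _categorize_sunat_procedure(name: str, description: str, url: str) -> str:
--     text = f"{name} {description} {url}".lower()
--     best = min((rank for kw, rank in _KEYWORD_RANK.items() if kw in text), default=4)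
--     return _RANK_CATEGORY[best]
-- ===== Notes on version B (the rewrite author's own statement) =====
-- stated objective: alternative
-- what changed: Replaces the ordered first-match if/elif chain with an order-independent aggregation: a flat keyword->rank map (stored alphabetically) is reduced by min over all keywords present in the text, and the resulting rank indexes a rank->category table whose no-match slot is 'tributario'.
import Mathlib
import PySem

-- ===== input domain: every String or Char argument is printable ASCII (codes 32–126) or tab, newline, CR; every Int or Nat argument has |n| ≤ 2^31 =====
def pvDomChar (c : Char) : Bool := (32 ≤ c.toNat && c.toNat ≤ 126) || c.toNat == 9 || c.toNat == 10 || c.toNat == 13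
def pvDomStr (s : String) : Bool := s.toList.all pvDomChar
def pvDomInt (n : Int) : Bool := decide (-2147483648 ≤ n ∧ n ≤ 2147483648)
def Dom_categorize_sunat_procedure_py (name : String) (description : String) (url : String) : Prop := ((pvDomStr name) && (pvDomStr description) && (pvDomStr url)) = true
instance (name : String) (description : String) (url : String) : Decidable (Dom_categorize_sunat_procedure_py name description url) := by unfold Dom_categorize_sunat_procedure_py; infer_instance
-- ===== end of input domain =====

-- B replaces A's ordered first-match if/elif chain by an order-independent min-rank aggregation
-- over a flat keyword->rank map plus a rank->category table (objective: alternative, same cost).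

-- ===== PORT A =====
-- A: lowercase "name description url", then an if/elif chain of keyword membership tests.
def categorize_sunat_procedure_py (name : String) (description : String) (url : String) : String :=
  let text := PySem.Str.lower (PySem.Str.join " " [name, description, url])
  if ["importac", "export", "aduaner"].any (fun w => PySem.Str.isIn w text) then "aduanero"
  else if ["ruc", "tributar", "impuest"].any (fun w => PySem.Str.isIn w text) then "tributario"
  else if ["deposit", "almacen"].any (fun w => PySem.Str.isIn w text) then "deposito"
  else if ["transit", "transport"].any (fun w => PySem.Str.isIn w text) then "transito"
  else "tributario"

-- ===== PORT B =====
-- B: flat keyword->rank map (alphabetical; order irrelevant), min rank over all matching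
-- keywords (default 4), then index the rank->category table (slot 4 = 'tributario').
def sunatKeywordRank : List (String × Nat) :=
  [("aduaner", 0), ("almacen", 2), ("deposit", 2), ("export", 0), ("importac", 0),
   ("impuest", 1), ("ruc", 1), ("transit", 3), ("transport", 3), ("tributar", 1)]

def sunatRankCategory : List String :=
  ["aduanero", "tributario", "deposito", "transito", "tributario"]

def categorize_sunat_procedure_py_alt (name : String) (description : String) (url : String) : String :=
  let text := PySem.Str.lower (PySem.Str.join " " [name, description, url])
  let best := (sunatKeywordRank.filter (fun p => PySem.Str.isIn p.1 text)).foldl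
      (fun b p => min b p.2) 4
  sunatRankCategory.getD best "tributario"

-- ===== PRECONDITION & SPEC =====
def Spec_categorize_sunat_procedure_py (name : String) (description : String) (url : String) (out : String) : Prop := out = categorize_sunat_procedure_py_alt name description url
instance (name : String) (description : String) (url : String) (out : String) : Decidable (Spec_categorize_sunat_procedure_py name description url out) := by unfold Spec_categorize_sunat_procedure_py; infer_instance

-- ===== CLAIM (what is proved, stated in full; the proofs are below) =====
def Claim_equal_categorize_sunat_procedure_py : Prop := ∀ (name : String) (description : String) (url : String), Dom_categorize_sunat_procedure_py name description url → Spec_categorize_sunat_procedure_py name description url (categorize_sunat_procedure_py name description url)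

-- ===== LEMMAS AND PROOFS =====

-- A's chain returns the category of the lowest-rank keyword group that fires; B computes that
-- lowest rank directly. Full case split on the ten membership booleans closes every case.
set_option maxHeartbeats 4000000 in
theorem sunat_chain_eq_min_rank (text : String) :
    (if ["importac", "export", "aduaner"].any (fun w => PySem.Str.isIn w text) then "aduanero"
     else if ["ruc", "tributar", "impuest"].any (fun w => PySem.Str.isIn w text) then "tributario"
     else if ["deposit", "almacen"].any (fun w => PySem.Str.isIn w text) then "deposito"
     else if ["transit", "transport"].any (fun w => PySem.Str.isIn w text) then "transito"
     else "tributario")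
    = sunatRankCategory.getD
        ((sunatKeywordRank.filter (fun p => PySem.Str.isIn p.1 text)).foldl
          (fun b p => min b p.2) 4) "tributario" := by
  simp only [sunatKeywordRank, sunatRankCategory, List.filter, List.any_cons, List.any_nil,
    Bool.or_false]
  cases PySem.Str.isIn "importac" text <;> cases PySem.Str.isIn "export" text <;>
    cases PySem.Str.isIn "aduaner" text <;> cases PySem.Str.isIn "ruc" text <;>
    cases PySem.Str.isIn "tributar" text <;> cases PySem.Str.isIn "impuest" text <;>
    cases PySem.Str.isIn "deposit" text <;> cases PySem.Str.isIn "almacen" text <;>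
    cases PySem.Str.isIn "transit" text <;> cases PySem.Str.isIn "transport" text <;> rfl

-- ===== VERDICT (by name: the statement is the Claim_ definition above) =====
theorem categorize_sunat_procedure_py_spec : Claim_equal_categorize_sunat_procedure_py := by
  intro name description url _
  unfold Spec_categorize_sunat_procedure_py categorize_sunat_procedure_py categorize_sunat_procedure_py_alt
  exact sunat_chain_eq_min_rank (PySem.Str.lower (PySem.Str.join " " [name, description, url]))
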